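-- pv_equiv track=rewrite | github.com/takapdayon/atcoder | abc/AtCoderBeginnerContest124/B.py | great_ocean_view
-- ===== SOURCE A (Python) =====
-- def great_ocean_view(n, hli):
--
--     ans = 0
--     hlimax = hli[0]
--
--     for i in hli:
--         if hlimax <= i:
--             ans += 1
--             hlimax = i
--
--     return ans
-- ===== SOURCE B (Python) =====
-- def great_ocean_view(n, hli):
--     # Pass 1: build the inclusive prefix-maximum table.
--     pref = []
--     m = hli[0]
--     for h in hli:
--         m = max(m, h)
--         pref.append(m)
--     # Pass 2: a mountain sees the ocean iff it equals its prefix maximum.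
--     return sum(h == p for h, p in zip(hli, pref))
-- ===== Notes on version B (the rewrite author's own statement) =====
-- stated objective: alternative
-- what changed: Replaces A's single fused running-max-and-count loop by two separate passes: first build the inclusive prefix-maximum table, then count the indices where the element equals its prefix maximum.
import Mathlib
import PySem

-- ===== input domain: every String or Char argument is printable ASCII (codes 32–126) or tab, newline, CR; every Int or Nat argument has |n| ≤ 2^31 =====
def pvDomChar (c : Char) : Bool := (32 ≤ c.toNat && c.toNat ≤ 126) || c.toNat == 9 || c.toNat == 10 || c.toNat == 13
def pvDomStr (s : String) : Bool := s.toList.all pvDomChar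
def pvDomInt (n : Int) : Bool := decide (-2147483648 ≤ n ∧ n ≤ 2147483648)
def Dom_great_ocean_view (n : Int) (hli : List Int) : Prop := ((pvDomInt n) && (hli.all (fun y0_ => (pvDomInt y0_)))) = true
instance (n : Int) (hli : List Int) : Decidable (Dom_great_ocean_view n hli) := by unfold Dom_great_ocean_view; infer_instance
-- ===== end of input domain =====

-- B replaces A's fused running-max-and-count loop by two passes: build the
-- inclusive prefix-maximum table, then count indices where the element equals
-- its prefix maximum (objective: alternative decomposition, same cost).

-- ===== PORT A =====
def great_ocean_view (n : Int) (hli : List Int) : Int :=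
  match PySem.List.pyGet? hli 0 with
  | none => 0  -- Python raises IndexError here; excluded by Pre_
  | some h0 =>
    (hli.foldl (fun (s : Int × Int) i => if s.2 ≤ i then (s.1 + 1, i) else s) (0, h0)).1

-- ===== PORT B =====
def great_ocean_view_alt (n : Int) (hli : List Int) : Int :=
  match PySem.List.pyGet? hli 0 with
  | none => 0  -- Python raises IndexError here; excluded by Pre_
  | some h0 =>
    -- pass 1: pref = inclusive prefix maxima
    let pref : List Int :=
      (hli.foldl (fun (s : List Int × Int) h =>
        let m := max s.2 h
        (s.1 ++ [m], m)) ([], h0)).1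
    -- pass 2: sum of booleans h == p over zip(hli, pref)
    (hli.zip pref).foldl (fun acc p => acc + (if p.1 = p.2 then (1 : Int) else 0)) 0

-- ===== PRECONDITION & SPEC =====
-- Pre_ excludes exactly the empty list, on which the Python A raises IndexError (hli[0]).
def Pre_great_ocean_view (n : Int) (hli : List Int) : Prop := hli ≠ []
instance (n : Int) (hli : List Int) : Decidable (Pre_great_ocean_view n hli) := by unfold Pre_great_ocean_view; infer_instance
def pvWitness_great_ocean_view : Int × List Int := (3, [2, 1, 3])

def Spec_great_ocean_view (n : Int) (hli : List Int) (out : Int) : Prop := out = great_ocean_view_alt n hli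
instance (n : Int) (hli : List Int) (out : Int) : Decidable (Spec_great_ocean_view n hli out) := by unfold Spec_great_ocean_view; infer_instance

-- ===== CLAIM (what is proved, stated in full; the proofs are below) =====
def Claim_equal_great_ocean_view : Prop := ∀ (n : Int) (hli : List Int), Dom_great_ocean_view n hli → Pre_great_ocean_view n hli → Spec_great_ocean_view n hli (great_ocean_view n hli)

-- ===== LEMMAS AND PROOFS =====

-- recursive form of B's prefix-maximum table
def prefList (m : Int) : List Int → List Int
  | [] => []
  | x :: xs => max m x :: prefList (max m x) xs

lemma prefList_foldl (l : List Int) : ∀ (acc : List Int) (m : Int),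
    (l.foldl (fun (s : List Int × Int) h => let m' := max s.2 h; (s.1 ++ [m'], m')) (acc, m)).1
      = acc ++ prefList m l := by
  induction l with
  | nil => simp [prefList]
  | cons x xs ih =>
    intro acc m
    simp only [List.foldl_cons, prefList]
    rw [ih]
    simp

-- recursive form of B's counting pass
def countEq : List (Int × Int) → Int
  | [] => 0
  | p :: ps => (if p.1 = p.2 then (1 : Int) else 0) + countEq ps

lemma countEq_foldl (ps : List (Int × Int)) : ∀ (c : Int),
    ps.foldl (fun acc p => acc + (if p.1 = p.2 then (1 : Int) else 0)) c = c + countEq ps := by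
  induction ps with
  | nil => simp [countEq]
  | cons p ps ih =>
    intro c
    simp only [List.foldl_cons, countEq, ih]
    ring

-- A's fused loop counts exactly the positions where the element equals its prefix max
lemma loopA_countEq (l : List Int) : ∀ (a m : Int),
    (l.foldl (fun (s : Int × Int) i => if s.2 ≤ i then (s.1 + 1, i) else s) (a, m)).1
      = a + countEq (l.zip (prefList m l)) := by
  induction l with
  | nil => simp [countEq, prefList]
  | cons x xs ih =>
    intro a m
    simp only [List.foldl_cons, prefList, List.zip_cons_cons, countEq]
    by_cases h : m ≤ x
    · have hmax : max m x = x := max_eq_right h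
      rw [if_pos h, hmax, ih]
      simp
      ring
    · have hmax : max m x = m := max_eq_left (le_of_not_ge h)
      have hne : ¬ (x = max m x) := by rw [hmax]; intro he; exact h (le_of_eq he.symm)
      rw [if_neg h, hmax, ih]
      rw [if_neg (by rw [hmax] at hne; exact hne)]
      ring

-- ===== VERDICT (by name: the statement is the Claim_ definition above) =====
theorem great_ocean_view_spec : Claim_equal_great_ocean_view := by
  intro n hli _ hpre
  unfold Spec_great_ocean_view great_ocean_view great_ocean_view_alt
  cases hli with
  | nil => exact absurd rfl hpre
  | cons h0 t =>
    have hget : PySem.List.pyGet? (h0 :: t) (0 : Int) = some h0 := by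
      simp [PySem.List.pyGet?, PySem.List.pyIdx?]
    rw [hget]
    simp only
    rw [prefList_foldl, countEq_foldl, loopA_countEq]
    simp [prefList, countEq]
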